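-- pv_equiv track=rewrite | github.com/Ajan2k/seo-system | app/utils/seo_utils.py | _contains_transition
-- ===== SOURCE A (Python) =====
-- TRANSITION_WORDS = {
--     # Agreement/addition/likewise
--     "additionally", "also", "and", "as well", "besides", "further", "furthermore",
--     "in addition", "moreover",
--     # Contrast
--     "however", "nevertheless", "nonetheless", "on the other hand", "instead", "still", "though", "conversely",
--     # Cause/effect
--     "therefore", "thus", "hence", "as a result", "consequently", "so",
--     # Examples
--     "for example", "for instance", "in fact", "notably", "specifically",
--     # Time/order
--     "first", "second", "third", "next", "then", "afterward", "finally", "meanwhile",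
--     # Emphasis/clarification
--     "indeed", "in other words", "similarly", "in contrast"
-- }
--
-- def _contains_transition(sentence: str) -> bool:
--     low = sentence.lower()
--     # Check sentence start transitions and inline transitions
--     starts = [
--         "however", "moreover", "furthermore", "additionally", "therefore", "thus",
--         "for example", "for instance", "meanwhile", "in addition", "consequently",
--         "in contrast", "similarly", "indeed", "in other words", "finally", "next", "then"
--     ]
--     if any(low.startswith(tw + ' ') or low.startswith(tw + ',') for tw in starts):
--         return True
--     return any(f" {tw} " in low for tw in TRANSITION_WORDS)
-- ===== SOURCE B (Python) =====
-- # B: one shared prefix trie (an automaton) over both word lists, walked once per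
-- # candidate position, instead of A's per-word substring searches.
--
-- _STARTS = (
--     "however", "moreover", "furthermore", "additionally", "therefore", "thus",
--     "for example", "for instance", "meanwhile", "in addition", "consequently",
--     "in contrast", "similarly", "indeed", "in other words", "finally", "next", "then",
-- )
--
-- _WORDS = (
--     "additionally", "also", "and", "as well", "besides", "further", "furthermore",
--     "in addition", "moreover",
--     "however", "nevertheless", "nonetheless", "on the other hand", "instead", "still", "though", "conversely",
--     "therefore", "thus", "hence", "as a result", "consequently", "so",
--     "for example", "for instance", "in fact", "notably", "specifically",
--     "first", "second", "third", "next", "then", "afterward", "finally", "meanwhile",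
--     "indeed", "in other words", "similarly", "in contrast",
-- )
--
--
-- def _trie_insert(root, word, fi):
--     node = root
--     for ch in word:
--         node = node[1].setdefault(ch, [[False, False], {}])
--     node[0][fi] = True
--
--
-- _TRIE = [[False, False], {}]
-- for _w in _WORDS:
--     _trie_insert(_TRIE, _w, 0)
-- for _w in _STARTS:
--     _trie_insert(_TRIE, _w, 1)
--
--
-- def _walk(node, s, fi, follow):
--     # descend the trie along s; accept at any node flagged fi whose next
--     # input character is in 'follow'
--     while True:
--         flags, kids = node
--         if flags[fi] and s[:1] in follow:
--             return True
--         if not s: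
--             return False
--         node = kids.get(s[0])
--         if node is None:
--             return False
--         s = s[1:]
--
--
-- def _contains_transition(sentence: str) -> bool:
--     low = sentence.lower()
--     if _walk(_TRIE, low, 1, (' ', ',')):
--         return True
--     for i in range(len(low)):
--         if low[i] == ' ' and _walk(_TRIE, low[i + 1:], 0, (' ',)):
--             return True
--     return False
-- ===== Notes on version B (the rewrite author's own statement) =====
-- stated objective: alternative
-- what changed: A runs a separate full substring/prefix search over the sentence for each of the ~40 transition words; B compiles both word lists once into a shared prefix trie (two terminal-flag sets plus a follower-character check) and answers by walking that single automaton from the sentence start and from each space position, so the per-word loops disappear.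
import Mathlib
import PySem

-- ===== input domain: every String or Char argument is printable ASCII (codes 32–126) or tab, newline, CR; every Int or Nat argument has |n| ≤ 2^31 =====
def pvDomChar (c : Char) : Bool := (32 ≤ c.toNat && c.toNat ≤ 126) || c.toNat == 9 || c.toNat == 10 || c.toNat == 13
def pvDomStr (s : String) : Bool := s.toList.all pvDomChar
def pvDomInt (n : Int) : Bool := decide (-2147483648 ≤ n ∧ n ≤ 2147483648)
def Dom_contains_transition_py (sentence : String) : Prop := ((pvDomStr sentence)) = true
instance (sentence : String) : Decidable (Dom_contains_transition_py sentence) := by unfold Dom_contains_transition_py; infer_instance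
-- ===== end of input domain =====

-- B replaces A's per-word substring searches by one shared prefix trie (an
-- automaton over both word lists) walked from each candidate position
-- (objective: alternative algorithm/data structure).

-- ===== PORT A =====
-- the 'starts' list, in A's order
def pvStartsA : List String := [
  "however", "moreover", "furthermore", "additionally", "therefore", "thus",
  "for example", "for instance", "meanwhile", "in addition", "consequently",
  "in contrast", "similarly", "indeed", "in other words", "finally", "next", "then"]

-- TRANSITION_WORDS: a Python set literal of 40 distinct words; 'any' over it is
-- order-independent, so the insertion-order list represents it exactly
def pvWordsA : List String := [
  "additionally", "also", "and", "as well", "besides", "further", "furthermore",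
  "in addition", "moreover",
  "however", "nevertheless", "nonetheless", "on the other hand", "instead", "still", "though", "conversely",
  "therefore", "thus", "hence", "as a result", "consequently", "so",
  "for example", "for instance", "in fact", "notably", "specifically",
  "first", "second", "third", "next", "then", "afterward", "finally", "meanwhile",
  "indeed", "in other words", "similarly", "in contrast"]

def contains_transition_py (sentence : String) : Bool :=
  let low := PySem.Chars.lower sentence.toList
  if pvStartsA.any (fun tw =>
      PySem.Chars.startswith low (tw.toList ++ [' ']) ||
      PySem.Chars.startswith low (tw.toList ++ [','])) then
    true
  else
    pvWordsA.any (fun tw => PySem.Chars.isIn (' ' :: (tw.toList ++ [' '])) low)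

-- ===== PORT B =====
def pvStartsB : List String := [
  "however", "moreover", "furthermore", "additionally", "therefore", "thus",
  "for example", "for instance", "meanwhile", "in addition", "consequently",
  "in contrast", "similarly", "indeed", "in other words", "finally", "next", "then"]

def pvWordsB : List String := [
  "additionally", "also", "and", "as well", "besides", "further", "furthermore",
  "in addition", "moreover",
  "however", "nevertheless", "nonetheless", "on the other hand", "instead", "still", "though", "conversely",
  "therefore", "thus", "hence", "as a result", "consequently", "so",
  "for example", "for instance", "in fact", "notably", "specifically",
  "first", "second", "third", "next", "then", "afterward", "finally", "meanwhile",
  "indeed", "in other words", "similarly", "in contrast"]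

-- the trie: a node carries two terminal flags (word-list / starts-list) and a
-- child list keyed by characters (explicit child-list type, no nested inductive)
mutual
inductive PTrie where
  | node : Bool → Bool → PKids → PTrie
inductive PKids where
  | nil : PKids
  | cons : Char → PTrie → PKids → PKids
end

def pvEmptyTrie : PTrie := .node false false .nil

-- kids.get(c) (first match)
def pvFindChild : PKids → Char → Option PTrie
  | .nil, _ => none
  | .cons c' t k, c => if c' = c then some t else pvFindChild k c

-- write back the (possibly new) child for c
def pvSetChild : PKids → Char → PTrie → PKids
  | .nil, c, t => .cons c t .nil
  | .cons c' t' k, c, t => if c' = c then .cons c' t k else .cons c' t' (pvSetChild k c t)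

-- _trie_insert: descend along the word (setdefault = existing child or a fresh
-- empty node), set flag fi at the end
def pvInsert (fi : Bool) : List Char → PTrie → PTrie
  | [], .node w s kids => if fi then .node w true kids else .node true s kids
  | c :: cs, .node w s kids =>
      .node w s (pvSetChild kids c (pvInsert fi cs ((pvFindChild kids c).getD pvEmptyTrie)))

def pvTrie : PTrie :=
  pvStartsB.foldl (fun t w => pvInsert true w.toList t)
    (pvWordsB.foldl (fun t w => pvInsert false w.toList t) pvEmptyTrie)

-- _walk: descend the trie along s, accepting at a flagged node whose next input
-- char is allowed.  On empty s Python's flag test "s[:1] in follow" fails and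
-- 'if not s' returns False, so the empty case is False outright.
def pvWalk (fi : Bool) (follow : List Char) : PTrie → List Char → Bool
  | _, [] => false
  | .node w st kids, c :: rest =>
    ((if fi then st else w) && follow.contains c) ||
    match pvFindChild kids c with
    | none => false
    | some t' => pvWalk fi follow t' rest

-- the position loop: at each space, walk the trie on the rest in word mode
def pvScanB (low : List Char) : Bool :=
  match low with
  | [] => false
  | c :: rest => (c == ' ' && pvWalk false [' '] pvTrie rest) || pvScanB rest

def contains_transition_py_alt (sentence : String) : Bool :=
  let low := PySem.Chars.lower sentence.toList
  if pvWalk true [' ', ','] pvTrie low then true else pvScanB low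

-- ===== PRECONDITION & SPEC =====
def Spec_contains_transition_py (sentence : String) (out : Bool) : Prop := out = contains_transition_py_alt sentence
instance (sentence : String) (out : Bool) : Decidable (Spec_contains_transition_py sentence out) := by unfold Spec_contains_transition_py; infer_instance

-- ===== CLAIM (what is proved, stated in full; the proofs are below) =====
def Claim_equal_contains_transition_py : Prop := ∀ (sentence : String), Dom_contains_transition_py sentence → Spec_contains_transition_py sentence (contains_transition_py sentence)

-- ===== LEMMAS AND PROOFS =====

-- "s[:1] in follow": the next input character is allowed
def pvFollowOk (follow : List Char) : List Char → Bool
  | c :: _ => follow.contains c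
  | [] => false

-- the empty trie never accepts
lemma pvWalk_empty (fi : Bool) (follow : List Char) (l : List Char) :
    pvWalk fi follow pvEmptyTrie l = false := by
  cases l <;> simp [pvWalk, pvEmptyTrie, pvFindChild]

theorem pvFindChild_setChild_self : ∀ (k : PKids) (c : Char) (t : PTrie),
    pvFindChild (pvSetChild k c t) c = some t
  | .nil, c, t => by simp [pvSetChild, pvFindChild]
  | .cons c' t' k, c, t => by
    by_cases h : c' = c <;>
      simp [pvSetChild, pvFindChild, h, pvFindChild_setChild_self k c t]

theorem pvFindChild_setChild_ne : ∀ (k : PKids) (c d : Char) (t : PTrie), d ≠ c →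
    pvFindChild (pvSetChild k c t) d = pvFindChild k d
  | .nil, c, d, t, h => by simp [pvSetChild, pvFindChild, Ne.symm h]
  | .cons c' t' k, c, d, t, h => by
    by_cases h' : c' = c
    · subst h'
      simp [pvSetChild, pvFindChild, Ne.symm h]
    · simp [pvSetChild, pvFindChild, h', pvFindChild_setChild_ne k c d t h]

-- inserting word w with flag fj adds exactly the acceptances 'w is a prefix and
-- the char after it is allowed', visible to walks with fi = fj
lemma pvWalk_insert (fi fj : Bool) (follow : List Char) (w : List Char) :
    ∀ (t : PTrie) (l : List Char),
    pvWalk fi follow (pvInsert fj w t) l =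
      (pvWalk fi follow t l ||
       (fi == fj && PySem.Chars.startswith l w && pvFollowOk follow (l.drop w.length))) := by
  induction w with
  | nil =>
    intro t l
    obtain ⟨tw, ts, kids⟩ := t
    cases l with
    | nil => cases fi <;> cases fj <;> simp [pvWalk, pvFollowOk]
    | cons c rest =>
      cases fi <;> cases fj <;> cases tw <;> cases ts <;>
        by_cases hc : c ∈ follow <;>
        simp [pvInsert, pvWalk, pvFollowOk, PySem.Chars.startswith, List.isPrefixOf, hc]
  | cons c cs ih =>
    intro t l
    obtain ⟨tw, ts, kids⟩ := t
    cases l with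
    | nil => simp [pvWalk, PySem.Chars.startswith, pvFollowOk]
    | cons d rest =>
      by_cases hdc : d = c
      · subst hdc
        simp only [pvInsert, pvWalk, pvFindChild_setChild_self, ih]
        cases h : pvFindChild kids d with
        | none =>
          simp [pvWalk_empty, PySem.Chars.startswith, List.isPrefixOf]
        | some t' =>
          simp [PySem.Chars.startswith, List.isPrefixOf, Bool.or_assoc]
      · have hne : (c == d) = false := beq_eq_false_iff_ne.mpr (Ne.symm hdc)
        have hst : PySem.Chars.startswith (d :: rest) (c :: cs) = false := by
          simp [PySem.Chars.startswith, List.isPrefixOf, hne]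
        simp [pvInsert, pvWalk, pvFindChild_setChild_ne kids c d _ hdc, hst]

-- folding insertions of a whole list of words
lemma pvWalk_foldl (fi fj : Bool) (follow : List Char) (ws : List String) :
    ∀ (t0 : PTrie) (l : List Char),
    pvWalk fi follow (ws.foldl (fun t w => pvInsert fj w.toList t) t0) l =
      (pvWalk fi follow t0 l ||
       (fi == fj && ws.any (fun w =>
          PySem.Chars.startswith l w.toList &&
          pvFollowOk follow (l.drop w.toList.length)))) := by
  induction ws with
  | nil => intro t0 l; simp
  | cons w ws ih =>
    intro t0 l
    simp only [List.foldl_cons, ih, pvWalk_insert, List.any_cons]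
    cases fi <;> cases fj <;>
      simp [Bool.or_assoc, Bool.and_or_distrib_left]

lemma pvFollowOk_singleton (c : Char) (l : List Char) :
    pvFollowOk [c] l = PySem.Chars.startswith l [c] := by
  cases l with
  | nil => simp [pvFollowOk, PySem.Chars.startswith, List.isPrefixOf]
  | cons d r =>
    rw [Bool.eq_iff_iff]
    simp [pvFollowOk, PySem.Chars.startswith, List.isPrefixOf]
    exact eq_comm

lemma pvFollowOk_pair (a b : Char) (l : List Char) :
    pvFollowOk [a, b] l = (PySem.Chars.startswith l [a] || PySem.Chars.startswith l [b]) := by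
  cases l with
  | nil => simp [pvFollowOk, PySem.Chars.startswith, List.isPrefixOf]
  | cons d r =>
    rw [Bool.eq_iff_iff]
    simp [pvFollowOk, PySem.Chars.startswith, List.isPrefixOf]
    constructor <;> rintro (rfl | rfl) <;> simp

-- splitting a prefix test on 'tw ++ [c]' into startswith tw + look at the next char
lemma startswith_append_singleton (l tw : List Char) (c : Char) :
    PySem.Chars.startswith l (tw ++ [c]) =
      (PySem.Chars.startswith l tw && PySem.Chars.startswith (l.drop tw.length) [c]) := by
  rw [Bool.eq_iff_iff]
  simp only [Bool.and_eq_true, PySem.Chars.startswith_iff]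
  constructor
  · rintro ⟨t, rfl⟩
    refine ⟨⟨[c] ++ t, by simp⟩, ?_⟩
    rw [List.append_assoc, List.drop_left]
    exact ⟨t, rfl⟩
  · rintro ⟨⟨t1, rfl⟩, h2⟩
    rw [List.drop_left] at h2
    obtain ⟨t2, rfl⟩ := h2
    exact ⟨t2, by simp⟩

-- the word-mode walk of the built trie = 'some word followed by a space starts here'
lemma pvWalk_trie_word (l : List Char) :
    pvWalk false [' '] pvTrie l =
      pvWordsB.any (fun tw => PySem.Chars.startswith l (tw.toList ++ [' '])) := by
  simp only [pvTrie, pvWalk_foldl, pvWalk_empty, pvFollowOk_singleton,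
    startswith_append_singleton]
  simp

-- the start-mode walk of the built trie = A's sentence-start test
lemma pvWalk_trie_start (l : List Char) :
    pvWalk true [' ', ','] pvTrie l =
      pvStartsB.any (fun tw =>
        PySem.Chars.startswith l (tw.toList ++ [' ']) ||
        PySem.Chars.startswith l (tw.toList ++ [','])) := by
  simp only [pvTrie, pvWalk_foldl, pvWalk_empty, pvFollowOk_pair,
    startswith_append_singleton]
  simp [Bool.and_or_distrib_left]

-- the position loop finds exactly the words occurring as ' tw ' somewhere in low
lemma pvScanB_eq_any_isIn (low : List Char) :
    pvScanB low = pvWordsA.any (fun tw => PySem.Chars.isIn (' ' :: (tw.toList ++ [' '])) low) := by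
  have hW : pvWordsB = pvWordsA := rfl
  induction low with
  | nil => decide
  | cons c rest ih =>
    rw [pvScanB, pvWalk_trie_word, hW, ih, Bool.eq_iff_iff]
    simp only [Bool.or_eq_true, Bool.and_eq_true, List.any_eq_true, beq_iff_eq,
      PySem.Chars.startswith_iff, PySem.Chars.isIn_iff_infix, List.infix_cons_iff,
      List.cons_prefix_cons]
    constructor
    · rintro (⟨rfl, tw, htw, hp⟩ | ⟨tw, htw, hi⟩)
      · exact ⟨tw, htw, Or.inl ⟨rfl, hp⟩⟩
      · exact ⟨tw, htw, Or.inr hi⟩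
    · rintro ⟨tw, htw, (⟨h1, hp⟩ | hi)⟩
      · exact Or.inl ⟨h1.symm, tw, htw, hp⟩
      · exact Or.inr ⟨tw, htw, hi⟩

-- ===== VERDICT (by name: the statement is the Claim_ definition above) =====
theorem contains_transition_py_spec : Claim_equal_contains_transition_py := by
  intro s _
  have hB : pvStartsB = pvStartsA := rfl
  simp only [Spec_contains_transition_py, contains_transition_py, contains_transition_py_alt,
    pvWalk_trie_start, pvScanB_eq_any_isIn, hB]
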